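-- pv_equiv track=rewrite | github.com/nelsonzhouu/CiteOnSight | backend/app/services/formatters.py | _authors_chicago
-- ===== SOURCE A (Python) =====
-- def _parse_name(full_name: str) -> tuple[str, str]:
--     """
--     Split 'Jane Marie Smith' into ('Smith', 'Jane Marie').
--     Assumes Western name order: given names first, family name last.
--     Single-word names are treated as family names.
--     """
--     parts = full_name.strip().split()
--     if len(parts) == 1:
--         return parts[0], ""
--     return parts[-1], " ".join(parts[:-1])
--
-- def _authors_chicago(authors: list[str] | None) -> str | None:
--     """
--     Chicago: First author is Last, First. Others are First Last. 4+ → et al.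
--     e.g. 'Smith, Jane, Bob Jones, and Carol Williams'
--     """
--     if not authors:
--         return None
--
--     last0, first0 = _parse_name(authors[0])
--     first_author = f"{last0}, {first0}" if first0 else last0
--
--     if len(authors) == 1:
--         return first_author
--     if len(authors) >= 4:
--         return f"{first_author}, et al."
--
--     rest = []
--     for author in authors[1:]:
--         last, first = _parse_name(author)
--         rest.append(f"{first} {last}" if first else last)
--
--     if len(rest) == 1:
--         return f"{first_author}, and {rest[0]}"
--     return f"{first_author}, " + ", ".join(rest[:-1]) + f", and {rest[-1]}"
-- ===== SOURCE B (Python) =====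
-- def _display(i, name):
--     """Display form of author i: 'Last, First' for i==0, 'First Last' (= the
--     whitespace-normalized name) otherwise."""
--     toks = name.strip().split()
--     if i == 0 and len(toks) > 1:
--         return toks[-1] + ", " + " ".join(toks[:-1])
--     return " ".join(toks)
--
-- def _join(names):
--     """Recursive Oxford-comma join: [x] -> x, [x,y] -> 'x, and y', else head + ', ' + rest."""
--     if len(names) <= 1:
--         return names[0] if names else ""
--     if len(names) == 2:
--         return names[0] + ", and " + names[1]
--     return names[0] + ", " + _join(names[1:])
--
-- def _authors_chicago(authors):
--     if not authors:
--         return None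
--     if len(authors) >= 4:
--         return _display(0, authors[0]) + ", et al."
--     return _join([_display(i, a) for i, a in enumerate(authors)])
-- ===== Notes on version B (the rewrite author's own statement) =====
-- stated objective: simpler
-- what changed: Drops the (last, first)-tuple parser and all count-specific assembly branches: a position-aware display function renders each author directly (non-first authors are just ' '.join of the tokens), and a recursive Oxford-comma joiner assembles the list, with et-al short-circuiting before any list is built.
import Mathlib
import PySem

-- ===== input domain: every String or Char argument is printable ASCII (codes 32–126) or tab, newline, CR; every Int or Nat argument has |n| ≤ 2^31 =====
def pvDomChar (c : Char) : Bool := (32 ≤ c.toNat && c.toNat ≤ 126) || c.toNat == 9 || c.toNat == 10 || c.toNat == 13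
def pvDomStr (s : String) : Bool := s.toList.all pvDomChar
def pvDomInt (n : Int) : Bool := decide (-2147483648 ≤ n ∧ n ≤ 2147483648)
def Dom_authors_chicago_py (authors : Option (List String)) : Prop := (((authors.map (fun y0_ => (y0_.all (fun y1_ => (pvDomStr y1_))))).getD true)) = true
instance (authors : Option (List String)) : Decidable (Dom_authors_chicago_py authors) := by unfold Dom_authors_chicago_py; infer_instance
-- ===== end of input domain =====

-- B drops the (last, first)-tuple parser and count-specific branches: a position-aware display function plus a recursive Oxford-comma joiner (same cost, simpler decomposition).


-- ===== PORT A =====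
-- _parse_name: 'Jane Marie Smith' → ('Smith', 'Jane Marie'); none = IndexError on a token-less string
def parseNameA (s : String) : Option (String × String) :=
  let parts := PySem.Str.split₀ (PySem.Str.strip s)
  if parts.length == 1 then
    (PySem.List.pyGet? parts 0).map (fun p => (p, ""))
  else
    (PySem.List.pyGet? parts (-1)).map
      (fun l => (l, PySem.Str.join " " (PySem.List.slice parts none (some (-1)))))

def authors_chicago_py (authors : Option (List String)) : Option String :=
  match authors with
  | none => none
  | some [] => none
  | some (a0 :: tl) =>
    match parseNameA a0 with
    | none => none
    | some (last0, first0) =>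
      let firstAuthor := if first0 ≠ "" then last0 ++ ", " ++ first0 else last0
      if tl.length = 0 then some firstAuthor
      else if tl.length + 1 ≥ 4 then some (firstAuthor ++ ", et al.")
      else
        match tl.foldl
          (fun acc a => acc.bind (fun r => (parseNameA a).map
            (fun p => r ++ [if p.2 ≠ "" then p.2 ++ " " ++ p.1 else p.1]))) (some []) with
        | none => none
        | some rest =>
          if rest.length = 1 then
            (PySem.List.pyGet? rest 0).map (fun r => firstAuthor ++ ", and " ++ r)
          else
            (PySem.List.pyGet? rest (-1)).map (fun r =>
              firstAuthor ++ ", " ++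
                PySem.Str.join ", " (PySem.List.slice rest none (some (-1))) ++
                ", and " ++ r)

-- ===== PORT B =====
-- _display: display form of author i ('Last, First' for i = 0, the whitespace-normalized
-- name otherwise); the toks[-1] access is guarded by len(toks) > 1, so pyGetD's default "" is unreachable
def displayB (i : Nat) (name : String) : String :=
  let toks := PySem.Str.split₀ (PySem.Str.strip name)
  if i == 0 && toks.length > 1 then
    PySem.List.pyGetD toks (-1) "" ++ ", " ++
      PySem.Str.join " " (PySem.List.slice toks none (some (-1)))
  else
    PySem.Str.join " " toks

-- _join: recursive Oxford-comma joiner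
def joinB : List String → String
  | [] => ""
  | [x] => x
  | [x, y] => x ++ ", and " ++ y
  | x :: y :: z :: rest => x ++ ", " ++ joinB (y :: z :: rest)

def authors_chicago_py_alt (authors : Option (List String)) : Option String :=
  match authors with
  | none => none
  | some [] => none
  | some (a0 :: tl) =>
    if tl.length + 1 ≥ 4 then some (displayB 0 a0 ++ ", et al.")
    else some (joinB ((a0 :: tl).mapIdx (fun i a => displayB i a)))

-- ===== PRECONDITION & SPEC =====
-- Pre_ excludes exactly the inputs where A raises IndexError: a parsed author string with no
-- whitespace-separated token (authors[0] always; authors[1:] only when 2 ≤ len(authors) ≤ 3).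
def Pre_authors_chicago_py (authors : Option (List String)) : Prop :=
  match authors with
  | none => True
  | some [] => True
  | some (a0 :: tl) =>
    PySem.Str.split₀ (PySem.Str.strip a0) ≠ [] ∧
      (tl.length + 1 ≥ 4 ∨ ∀ s ∈ tl, PySem.Str.split₀ (PySem.Str.strip s) ≠ [])
instance (authors : Option (List String)) : Decidable (Pre_authors_chicago_py authors) := by
  unfold Pre_authors_chicago_py
  rcases authors with _ | (_ | ⟨a0, tl⟩) <;> infer_instance

def pvWitness_authors_chicago_py : Option (List String) := some ["Jane Smith", "Bob Jones"]

def Spec_authors_chicago_py (authors : Option (List String)) (out : Option String) : Prop :=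
  out = authors_chicago_py_alt authors
instance (authors : Option (List String)) (out : Option String) :
    Decidable (Spec_authors_chicago_py authors out) := by
  unfold Spec_authors_chicago_py; infer_instance

-- ===== CLAIM (what is proved, stated in full; the proofs are below) =====
def Claim_equal_authors_chicago_py : Prop :=
  ∀ (authors : Option (List String)), Dom_authors_chicago_py authors →
    Pre_authors_chicago_py authors →
    Spec_authors_chicago_py authors (authors_chicago_py authors)

-- ===== LEMMAS AND PROOFS =====

-- every token produced by split₀ is nonempty
theorem split₀_go_ne_nil :
    ∀ (s cur : List Char) (acc : List (List Char)),
      (∀ x ∈ acc, x ≠ []) → ∀ x ∈ PySem.Chars.split₀.go s cur acc, x ≠ [] := by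
  intro s
  induction s with
  | nil =>
    intro cur acc hacc x hx
    unfold PySem.Chars.split₀.go at hx
    by_cases hc : cur.isEmpty
    · simp [hc] at hx
      exact hacc x (by simpa using hx)
    · simp [hc] at hx
      rcases hx with h | h
      · exact hacc x h
      · subst h
        simp [List.isEmpty_iff] at hc
        simpa using hc
  | cons c rest ih =>
    intro cur acc hacc x hx
    unfold PySem.Chars.split₀.go at hx
    by_cases hs : PySem.Chars.isspace c
    · by_cases hc : cur.isEmpty
      · simp [hs, hc] at hx
        exact ih [] acc hacc x hx
      · simp [hs, hc] at hx
        refine ih [] (cur.reverse :: acc) ?_ x hx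
        intro y hy
        rcases List.mem_cons.mp hy with h | h
        · subst h
          simp [List.isEmpty_iff] at hc
          simpa using hc
        · exact hacc y h
    · simp [hs] at hx
      exact ih (c :: cur) acc hacc x hx

theorem mem_strSplit₀_ne_empty (s : String) (w : String)
    (hw : w ∈ PySem.Str.split₀ s) : w.toList ≠ [] := by
  simp [PySem.Str.split₀] at hw
  obtain ⟨cs, hcs, rfl⟩ := hw
  have h2 := split₀_go_ne_nil s.toList [] [] (by simp) cs
    (by simpa [PySem.Chars.split₀] using hcs)
  simpa using h2

-- join over a nonempty list ending in z
theorem chars_join_append_last (sep z : List Char) :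
    ∀ (l : List (List Char)), l ≠ [] →
      PySem.Chars.join sep (l ++ [z]) = PySem.Chars.join sep l ++ sep ++ z := by
  intro l
  induction l with
  | nil => intro h; exact absurd rfl h
  | cons a l ih =>
    intro _
    rcases l with _ | ⟨b, l'⟩
    · simp [PySem.Chars.join_cons_cons, PySem.Chars.join_singleton]
    · have := ih (by simp)
      simp only [List.cons_append, PySem.Chars.join_cons_cons] at *
      simp [this]

-- join of a cons with nonempty head is nonempty
theorem chars_join_cons_ne_nil (sep : List Char) (a : List Char) (l : List (List Char))
    (ha : a ≠ []) : PySem.Chars.join sep (a :: l) ≠ [] := by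
  rcases l with _ | ⟨b, l'⟩
  · simpa [PySem.Chars.join_singleton] using ha
  · simp [PySem.Chars.join_cons_cons]
    intro h
    exact absurd h ha

-- the 'first names' string of a multi-token name is nonempty
theorem join_dropLast_ne (t u : String) (us : List String) (ht : t.toList ≠ []) :
    PySem.Str.join " " ((t :: u :: us).dropLast) ≠ "" := by
  intro hcontra
  have h2 : (PySem.Str.join " " ((t :: u :: us).dropLast)).toList = [] := by
    rw [hcontra]; rfl
  rw [show (t :: u :: us).dropLast = t :: (u :: us).dropLast by simp] at h2
  simp [PySem.Str.toList_join] at h2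
  exact chars_join_cons_ne_nil _ _ _ ht h2

-- ' '.join of all tokens = ' '.join of the leading tokens ++ ' ' ++ last token
theorem join_all_eq (t u z : String) (us : List String)
    (hz : (t :: u :: us).getLast? = some z) :
    PySem.Str.join " " (t :: u :: us) =
      PySem.Str.join " " ((t :: u :: us).dropLast) ++ " " ++ z := by
  apply String.toList_inj.mp
  have hsplit : (t :: u :: us) = (t :: u :: us).dropLast ++ [z] := by
    have hne : (t :: u :: us) ≠ [] := by simp
    have hg : (t :: u :: us).getLast hne = z := by
      rwa [List.getLast?_eq_getLast hne, Option.some_inj] at hz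
    conv_lhs => rw [← List.dropLast_append_getLast hne, hg]
  have hmap : List.map String.toList (t :: u :: us) =
      List.map String.toList ((t :: u :: us).dropLast) ++ [z.toList] := by
    conv_lhs => rw [hsplit]
    simp
  have hne2 : List.map String.toList ((t :: u :: us).dropLast) ≠ [] := by
    rw [show (t :: u :: us).dropLast = t :: (u :: us).dropLast by simp]
    simp
  simp only [PySem.Str.toList_join, String.toList_append, hmap]
  rw [chars_join_append_last _ _ _ hne2]

-- L1: under Pre_, the first author's parse and B's display agree
theorem display0_eq (s : String) (h : PySem.Str.split₀ (PySem.Str.strip s) ≠ []) :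
    ∃ l f, parseNameA s = some (l, f) ∧
      displayB 0 s = (if f ≠ "" then l ++ ", " ++ f else l) := by
  rcases hps : PySem.Str.split₀ (PySem.Str.strip s) with _ | ⟨t, ts⟩
  · exact absurd hps h
  rcases ts with _ | ⟨u, us⟩
  · refine ⟨t, "", ?_, ?_⟩
    · simp [parseNameA, hps]
    · simp [displayB, hps]
      apply String.toList_inj.mp
      simp [PySem.Str.toList_join, PySem.Chars.join_singleton]
  · rcases hlast : (t :: u :: us).getLast? with _ | z
    · simp at hlast
    refine ⟨z, PySem.Str.join " " (PySem.List.slice (t :: u :: us) none (some (-1))), ?_, ?_⟩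
    · simp [parseNameA, hps, PySem.List.pyGet?_neg_one, hlast]
    · have ht : t.toList ≠ [] := mem_strSplit₀_ne_empty _ t (by rw [hps]; simp)
      have hsl : PySem.List.slice (t :: u :: us) none (some (-1)) = (t :: u :: us).dropLast := by
        simp [PySem.List.slice_to_neg_one]
      have hfne := join_dropLast_ne t u us ht
      rw [hsl]
      have hg : (t :: u :: us).getLast (by simp) = z := by
        rwa [List.getLast?_eq_getLast (by simp), Option.some_inj] at hlast
      have hfne' : ¬ PySem.Str.join " " (t :: (u :: us).dropLast) = "" := by
        simpa using hfne
      simp [displayB, hps, hfne', PySem.List.pyGetD_neg_one, hsl]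
      simpa [List.getLast_cons] using hg

-- L2: under Pre_, a non-first author's parse and B's display agree (i ≠ 0)
theorem displayPos_eq (i : Nat) (hi : i ≠ 0) (s : String)
    (h : PySem.Str.split₀ (PySem.Str.strip s) ≠ []) :
    ∃ l f, parseNameA s = some (l, f) ∧
      displayB i s = (if f ≠ "" then f ++ " " ++ l else l) := by
  rcases hps : PySem.Str.split₀ (PySem.Str.strip s) with _ | ⟨t, ts⟩
  · exact absurd hps h
  rcases ts with _ | ⟨u, us⟩
  · refine ⟨t, "", ?_, ?_⟩
    · simp [parseNameA, hps]
    · simp [displayB, hps]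
      apply String.toList_inj.mp
      simp [PySem.Str.toList_join, PySem.Chars.join_singleton]
  · rcases hlast : (t :: u :: us).getLast? with _ | z
    · simp at hlast
    refine ⟨z, PySem.Str.join " " (PySem.List.slice (t :: u :: us) none (some (-1))), ?_, ?_⟩
    · simp [parseNameA, hps, PySem.List.pyGet?_neg_one, hlast]
    · have ht : t.toList ≠ [] := mem_strSplit₀_ne_empty _ t (by rw [hps]; simp)
      have hsl : PySem.List.slice (t :: u :: us) none (some (-1)) = (t :: u :: us).dropLast := by
        simp [PySem.List.slice_to_neg_one]
      have hfne' : ¬ PySem.Str.join " " (t :: (u :: us).dropLast) = "" := by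
        simpa using join_dropLast_ne t u us ht
      rw [hsl]
      simp [displayB, hps, hi, hfne']
      simpa using join_all_eq t u z us hlast

theorem authors_chicago_py_spec : Claim_equal_authors_chicago_py := by
  intro authors _ hpre
  unfold Spec_authors_chicago_py
  rcases authors with _ | (_ | ⟨a0, tl⟩)
  · rfl
  · rfl
  unfold Pre_authors_chicago_py at hpre
  obtain ⟨h0, hrest⟩ := hpre
  obtain ⟨l0, f0, hp0, hd0⟩ := display0_eq a0 h0
  rcases tl with _ | ⟨b, tl1⟩
  · -- one author
    simp [authors_chicago_py, authors_chicago_py_alt, hp0, joinB, hd0]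
  rcases tl1 with _ | ⟨c, tl2⟩
  · -- two authors
    have hb : PySem.Str.split₀ (PySem.Str.strip b) ≠ [] := by
      rcases hrest with h4 | hall
      · simp at h4
      · exact hall b (by simp)
    obtain ⟨lb, fb, hpb, hdb⟩ := displayPos_eq 1 (by simp) b hb
    simp [authors_chicago_py, authors_chicago_py_alt, hp0, hpb, joinB, hd0, hdb]
  rcases tl2 with _ | ⟨d, tl3⟩
  · -- three authors
    have hb : PySem.Str.split₀ (PySem.Str.strip b) ≠ [] := by
      rcases hrest with h4 | hall
      · simp at h4
      · exact hall b (by simp)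
    have hc : PySem.Str.split₀ (PySem.Str.strip c) ≠ [] := by
      rcases hrest with h4 | hall
      · simp at h4
      · exact hall c (by simp)
    obtain ⟨lb, fb, hpb, hdb⟩ := displayPos_eq 1 (by simp) b hb
    obtain ⟨lc, fc, hpc, hdc⟩ := displayPos_eq 2 (by simp) c hc
    simp [authors_chicago_py, authors_chicago_py_alt, hp0, hpb, hpc, joinB, hd0, hdb, hdc,
      PySem.List.slice_to_neg_one, PySem.List.pyGet?_neg_one]
    apply String.toList_inj.mp
    simp [PySem.Str.toList_join, PySem.Chars.join_singleton]
  · -- four or more authors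
    simp [authors_chicago_py, authors_chicago_py_alt, hp0, hd0]
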